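-- pv_equiv track=rewrite | github.com/T0ren4ik/first_semester_py | рекурсия/14.13-14.py | znak
-- ===== SOURCE A (Python) =====
-- def znak(s):
--     L = '+-*/'
--     if len(s):
--         if s[0] in L:
--             return True
--         else:
--             return znak(s[1:])
--     else:
--         return False
-- ===== SOURCE B (Python) =====
-- def znak(s):
--     L = '+-*/'
--     for c in s:
--         if c in L:
--             return True
--     return False
-- ===== Notes on version B (the rewrite author's own statement) =====
-- stated objective: faster
-- what changed: Replaced the recursion over string slices (which copies the tail at each step) with a single explicit for-loop over the characters that returns True at the first operator.
import Mathlib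
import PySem

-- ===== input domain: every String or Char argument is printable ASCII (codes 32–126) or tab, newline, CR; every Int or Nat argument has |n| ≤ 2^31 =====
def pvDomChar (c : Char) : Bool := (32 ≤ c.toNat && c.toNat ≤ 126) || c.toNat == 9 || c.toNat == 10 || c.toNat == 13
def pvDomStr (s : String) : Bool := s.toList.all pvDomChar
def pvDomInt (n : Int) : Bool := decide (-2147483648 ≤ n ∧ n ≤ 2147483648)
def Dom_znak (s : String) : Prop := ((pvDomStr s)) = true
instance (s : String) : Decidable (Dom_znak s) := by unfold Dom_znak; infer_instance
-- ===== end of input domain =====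

-- B replaces A's recursion over string slices with one explicit for-loop over the characters (simpler).


-- ===== PORT A =====
-- A: if len(s): if s[0] in L: True else znak(s[1:]) else False — structural recursion over the characters
def znakRec : List Char → Bool
  | [] => false
  | c :: t => if ("+-*/".toList).contains c then true else znakRec t

def znak (s : String) : Bool := znakRec s.toList

-- ===== PORT B =====
-- B: for c in s: if c in L: return True; return False — a fold carrying the 'found' flag
def znak_alt (s : String) : Bool :=
  s.toList.foldl (fun found c => found || ("+-*/".toList).contains c) false

-- ===== PRECONDITION & SPEC =====
def Spec_znak (s : String) (out : Bool) : Prop := out = znak_alt s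
instance (s : String) (out : Bool) : Decidable (Spec_znak s out) := by unfold Spec_znak; infer_instance

-- ===== CLAIM (what is proved, stated in full; the proofs are below) =====
def Claim_equal_znak : Prop := ∀ (s : String), Dom_znak s → Spec_znak s (znak s)

-- ===== LEMMAS AND PROOFS =====
theorem foldl_or_eq (l : List Char) (b : Bool) :
    l.foldl (fun found c => found || ("+-*/".toList).contains c) b = (b || znakRec l) := by
  induction l generalizing b with
  | nil => simp [znakRec]
  | cons c t ih =>
    simp only [List.foldl, znakRec]
    rw [ih]
    cases ("+-*/".toList).contains c <;> simp

-- ===== VERDICT (by name: the statement is the Claim_ definition above) =====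
theorem znak_spec : Claim_equal_znak := by
  intro s _
  unfold Spec_znak znak znak_alt
  rw [foldl_or_eq]
  simp
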